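-- pv_equiv track=rewrite | github.com/Yijia-Chen/allumer | clipping_parser.py | find_all_authors
-- ===== SOURCE A (Python) =====
-- from typing import Dict, List
--
-- def find_all_authors(str: str) -> List[str]:
--     if len(str) == 0:
--         raise ValueError("Authors should not be empty.")
--
--     authors = []
--     breaks = [i for i, ch in enumerate(str) if ch == ';']
--     last_break = 0
--
--     for br in breaks:
--         author = str[last_break:br]
--         comma_index = author.find(',')
--
--         if comma_index > 0:
--             authors.append(author[comma_index+2:] + ' ' + author[:comma_index])
--         else:
--             authors.append(author)
--
--         last_break = br + 1
--
--     return authors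
-- ===== SOURCE B (Python) =====
-- from typing import List
--
-- def _reformat(author: str) -> str:
--     comma_index = author.find(',')
--     if comma_index > 0:
--         return author[comma_index+2:] + ' ' + author[:comma_index]
--     return author
--
-- def find_all_authors(str: str) -> List[str]:
--     if len(str) == 0:
--         raise ValueError("Authors should not be empty.")
--
--     # single pass: accumulate the current segment, emit it at each semicolon
--     authors = []
--     cur = ''
--     for ch in str:
--         if ch == ';':
--             authors.append(_reformat(cur))
--             cur = ''
--         else:
--             cur += ch
--     return authors
-- ===== Notes on version B (the rewrite author's own statement) =====
-- stated objective: simpler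
-- what changed: B replaces A's precomputed list of semicolon indices and last_break slicing bookkeeping with a single character-by-character pass that accumulates the current segment and emits its reformatted form at each semicolon.
import Mathlib
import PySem

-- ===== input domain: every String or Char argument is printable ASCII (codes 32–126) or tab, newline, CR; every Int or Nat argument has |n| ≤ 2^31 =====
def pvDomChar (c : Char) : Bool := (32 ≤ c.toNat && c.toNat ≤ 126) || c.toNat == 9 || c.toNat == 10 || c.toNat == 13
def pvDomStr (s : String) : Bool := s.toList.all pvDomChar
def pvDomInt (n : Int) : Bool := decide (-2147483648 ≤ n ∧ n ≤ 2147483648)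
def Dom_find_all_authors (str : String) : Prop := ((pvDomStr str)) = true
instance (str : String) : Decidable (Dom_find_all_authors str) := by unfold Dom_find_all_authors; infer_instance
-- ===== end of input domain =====

-- B replaces A's break-index list and last_break slicing bookkeeping by a single
-- character pass that accumulates the current segment and emits it at each semicolon
-- (objective: simpler; not claimed faster).

-- ===== PORT A =====
def find_all_authors (str : String) : List String :=
  if PySem.Str.len str = 0 then []   -- Python raises ValueError here; excluded by Pre_
  else
    let s := str.toList
    let breaks := (PySem.List.enumerate s).filterMap (fun p => if p.2 = ';' then some p.1 else none)
    let r := breaks.foldl (fun (st : List (List Char) × Int) br =>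
      let author := PySem.List.slice s (some st.2) (some br)
      let comma_index := PySem.Chars.find author [',']
      let authors :=
        if comma_index > 0 then
          st.1 ++ [PySem.List.slice author (some (comma_index + 2)) none ++ [' ']
                     ++ PySem.List.slice author none (some comma_index)]
        else st.1 ++ [author]
      (authors, br + 1)) ([], 0)
    r.1.map (fun cs => String.ofList cs)

-- ===== PORT B =====
-- Source B's helper `_reformat`
def pvFmt (author : List Char) : List Char :=
  let comma_index := PySem.Chars.find author [',']
  if comma_index > 0 then
    PySem.List.slice author (some (comma_index + 2)) none ++ [' ']
      ++ PySem.List.slice author none (some comma_index)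
  else author

-- Source B's loop: accumulate the current segment `cur`, emit at each semicolon
def pvGoB : List Char → List Char → List String
  | [], _ => []
  | ch :: rest, cur =>
    if ch = ';' then String.ofList (pvFmt cur) :: pvGoB rest []
    else pvGoB rest (cur ++ [ch])

def find_all_authors_alt (str : String) : List String :=
  if PySem.Str.len str = 0 then []   -- Python raises ValueError here; excluded by Pre_
  else pvGoB str.toList []

-- ===== PRECONDITION & SPEC =====
-- Pre_ excludes exactly the empty string, on which Python A raises ValueError.
def Pre_find_all_authors (str : String) : Prop := str.toList ≠ []
instance (str : String) : Decidable (Pre_find_all_authors str) := by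
  unfold Pre_find_all_authors; infer_instance

def pvWitness_find_all_authors : String := "Doe, John;Roe, Jane"

def Spec_find_all_authors (str : String) (out : List String) : Prop := out = find_all_authors_alt str
instance (str : String) (out : List String) : Decidable (Spec_find_all_authors str out) := by
  unfold Spec_find_all_authors; infer_instance

-- ===== CLAIM (what is proved, stated in full; the proofs are below) =====
def Claim_equal_find_all_authors : Prop :=
  ∀ (str : String), Dom_find_all_authors str → Pre_find_all_authors str →
    Spec_find_all_authors str (find_all_authors str)

-- ===== LEMMAS AND PROOFS =====

-- segments of s ending at each semicolon (the text after the last ';' is dropped)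
def pvSegs : List Char → List (List Char)
  | [] => []
  | c :: t => if c = ';' then [] :: pvSegs t
              else match pvSegs t with
                   | [] => []
                   | h :: r => (c :: h) :: r

-- prepend `cur` onto the first segment (if any)
def pvConsHead (cur : List Char) : List (List Char) → List (List Char)
  | [] => []
  | h :: t => (cur ++ h) :: t

theorem pvConsHead_nil (l : List (List Char)) : pvConsHead [] l = l := by
  cases l <;> simp [pvConsHead]

theorem pvSegs_cons_ne (c : Char) (t : List Char) (h : c ≠ ';') :
    pvSegs (c :: t) = pvConsHead [c] (pvSegs t) := by
  simp [pvSegs, h]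
  cases pvSegs t <;> simp [pvConsHead]

theorem pvGoB_eq (s : List Char) : ∀ cur,
    pvGoB s cur = (pvConsHead cur (pvSegs s)).map (fun cs => String.ofList (pvFmt cs)) := by
  induction s with
  | nil => intro cur; simp [pvGoB, pvSegs, pvConsHead]
  | cons c t ih =>
    intro cur
    by_cases hc : c = ';'
    · subst hc
      simp only [pvGoB, reduceIte]
      rw [ih [], pvConsHead_nil]
      simp [pvSegs, pvConsHead]
    · rw [pvSegs_cons_ne c t hc]
      simp only [pvGoB, if_neg hc, ih]
      cases pvSegs t <;> simp [pvConsHead]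

-- positions of the semicolon character in s, as natural numbers
def pvNatBreaks : List Char → List Nat
  | [] => []
  | c :: t => (if c = ';' then [0] else []) ++ (pvNatBreaks t).map (· + 1)

theorem pvBreaks_eq (s : List Char) : ∀ (n : Int),
    (PySem.List.enumerate s n).filterMap (fun p => if p.2 = ';' then some p.1 else none)
      = (pvNatBreaks s).map (fun (k : Nat) => (k : Int) + n) := by
  induction s with
  | nil => intro n; simp [PySem.List.enumerate_nil, pvNatBreaks]
  | cons c t ih =>
    intro n
    have hmap : (pvNatBreaks t).map ((fun k : Nat => (k : Int) + n) ∘ (· + 1))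
        = (pvNatBreaks t).map (fun k : Nat => (k : Int) + (n + 1)) := by
      apply List.map_congr_left
      intro k _
      simp only [Function.comp_apply]
      push_cast
      omega
    rw [PySem.List.enumerate_cons, List.filterMap_cons]
    by_cases hc : c = ';'
    · simp only [hc, reduceIte, ih (n + 1), pvNatBreaks, List.map_map,
        List.map_cons, List.cons_append, List.nil_append, hmap]
      norm_num
    · simp only [hc, reduceIte, ih (n + 1), pvNatBreaks,
        List.map_map, List.nil_append, hmap]

-- the loop body of A appends exactly pvFmt of the current slice
theorem pvStepA (acc : List (List Char)) (author : List Char) :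
    (if PySem.Chars.find author [','] > 0 then
       acc ++ [PySem.List.slice author (some (PySem.Chars.find author [','] + 2)) none ++ [' ']
                 ++ PySem.List.slice author none (some (PySem.Chars.find author [',']))]
     else acc ++ [author]) = acc ++ [pvFmt author] := by
  unfold pvFmt
  split <;> simp [*]

-- a slice from lb to pre.length of pre ++ s is the tail of pre
theorem pvSliceMid (pre s : List Char) (lb : Nat) (hlb : lb ≤ pre.length) :
    PySem.List.slice (pre ++ s) (some (lb : Int)) (some (pre.length : Int)) = pre.drop lb := by
  rw [PySem.List.slice_natCast]
  rw [List.drop_append_of_le_length hlb]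
  rw [List.take_append_of_le_length (by simp)]
  rw [List.take_drop]
  rw [Nat.add_sub_cancel' hlb]
  simp

-- A's loop body is pointwise: append pvFmt of the current slice, advance past the break
theorem pvStepEq (full : List Char) :
    (fun (st : List (List Char) × Int) br =>
       let author := PySem.List.slice full (some st.2) (some br)
       let comma_index := PySem.Chars.find author [',']
       let authors :=
         if comma_index > 0 then
           st.1 ++ [PySem.List.slice author (some (comma_index + 2)) none ++ [' ']
                      ++ PySem.List.slice author none (some comma_index)]
         else st.1 ++ [author]
       (authors, br + 1))
    = (fun (st : List (List Char) × Int) br =>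
       (st.1 ++ [pvFmt (PySem.List.slice full (some st.2) (some br))], br + 1)) := by
  funext st br
  simp only [pvStepA]

-- main invariant: A's fold over the shifted breaks of s, slicing pre ++ s from lb,
-- produces acc followed by the formatted segments of s (first one prefixed by pre.drop lb)
theorem pvFoldA (s : List Char) : ∀ (pre : List Char) (lb : Nat), lb ≤ pre.length →
    ∀ (acc : List (List Char)),
    (((pvNatBreaks s).map (fun (k : Nat) => (k : Int) + pre.length)).foldl
       (fun (st : List (List Char) × Int) br =>
         (st.1 ++ [pvFmt (PySem.List.slice (pre ++ s) (some st.2) (some br))], br + 1))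
       (acc, (lb : Int))).1
      = acc ++ (pvConsHead (pre.drop lb) (pvSegs s)).map pvFmt := by
  induction s with
  | nil => intro pre lb hlb acc; simp [pvNatBreaks, pvSegs, pvConsHead]
  | cons c t ih =>
    intro pre lb hlb acc
    have hshift : ((pvNatBreaks t).map (· + 1)).map (fun (k : Nat) => (k : Int) + pre.length)
        = (pvNatBreaks t).map (fun (k : Nat) => (k : Int) + (pre ++ [c]).length) := by
      rw [List.map_map]
      apply List.map_congr_left
      intro k _
      simp only [Function.comp_apply, List.length_append, List.length_cons, List.length_nil]
      push_cast
      ring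
    by_cases hc : c = ';'
    · subst hc
      simp only [pvNatBreaks, reduceIte, List.map_cons,
        List.cons_append, List.nil_append, hshift, List.foldl_cons, Nat.cast_zero, zero_add]

      rw [pvSliceMid pre _ lb hlb]
      rw [List.append_cons]
      have hcast : ((pre ++ [';']).length : Int) = (pre.length : Int) + 1 := by simp
      rw [← hcast]
      rw [ih (pre ++ [';']) (pre ++ [';']).length le_rfl]
      simp only [pvSegs, reduceIte, pvConsHead, List.drop_length, List.map_cons, List.append_nil,
        List.append_assoc, List.singleton_append]
      cases pvSegs t <;> simp
    · simp only [pvNatBreaks, if_neg hc, List.nil_append, hshift]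
      rw [List.append_cons]
      rw [ih (pre ++ [c]) lb (by simp; omega)]
      rw [pvSegs_cons_ne c t hc]
      rw [List.drop_append_of_le_length hlb]
      cases pvSegs t <;> simp [pvConsHead]

theorem find_all_authors_spec' (str : String) (h : str.toList ≠ []) :
    find_all_authors str = find_all_authors_alt str := by
  have hlen : ¬ (PySem.Str.len str = 0) := by
    simp only [PySem.Str.len_eq]
    simpa using h
  have hmain := pvFoldA str.toList [] 0 (by simp) []
  simp only [List.nil_append, List.length_nil, Nat.cast_zero, add_zero,
    List.drop_nil] at hmain
  rw [pvConsHead_nil] at hmain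
  simp only [find_all_authors, find_all_authors_alt, if_neg hlen]
  rw [pvBreaks_eq str.toList 0]
  have hb : (pvNatBreaks str.toList).map (fun (k : Nat) => (k : Int) + 0)
      = (pvNatBreaks str.toList).map (fun (k : Nat) => (k : Int)) := by simp
  rw [hb, pvStepEq str.toList, hmain, pvGoB_eq str.toList [], pvConsHead_nil]
  simp [List.map_map]

-- ===== VERDICT (by name: the statement is the Claim_ definition above) =====
theorem find_all_authors_spec : Claim_equal_find_all_authors := by
  intro str _ hpre
  unfold Spec_find_all_authors
  exact find_all_authors_spec' str hpre
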